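-- pv_equiv track=rewrite | github.com/bigdale123/CS103 | Lab10/lab10_ungraded.py | dString
-- ===== SOURCE A (Python) =====
-- def dString(s):
--     ret_dict = {}
--     for i in s:
--         if i != " ":
--             if i in ret_dict:
--                 ret_dict[i] += 1
--             else:
--                 ret_dict[i] = 1
--     return ret_dict
-- ===== SOURCE B (Python) =====
-- def dString(s):
--     return {c: s.count(c) for c in dict.fromkeys(s) if c != " "}
-- ===== Notes on version B (the rewrite author's own statement) =====
-- stated objective: idiomatic
-- what changed: Replaces the accumulating per-character dict-update loop with a dict comprehension over the distinct characters (dict.fromkeys) that counts each non-space character with s.count, removing the mutable accumulator.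
import Mathlib
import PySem

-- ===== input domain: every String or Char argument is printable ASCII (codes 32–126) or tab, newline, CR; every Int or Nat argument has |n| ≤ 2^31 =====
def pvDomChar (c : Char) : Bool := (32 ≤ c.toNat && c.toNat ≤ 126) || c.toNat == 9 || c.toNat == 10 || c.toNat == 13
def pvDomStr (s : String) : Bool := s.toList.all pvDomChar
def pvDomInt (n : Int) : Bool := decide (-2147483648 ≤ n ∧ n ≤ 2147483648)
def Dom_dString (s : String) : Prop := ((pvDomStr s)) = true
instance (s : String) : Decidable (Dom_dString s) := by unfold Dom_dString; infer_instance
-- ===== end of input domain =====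

-- B replaces A's accumulating dict-update loop with a dict comprehension over the
-- distinct characters, counting each non-space character with s.count (idiomatic).

-- ===== PORT A =====
-- A's loop: for each character i of s (a 1-char string in Python, so the key is
-- String.mk [i]), skip spaces, increment an existing entry or insert it with 1.
def dString (s : String) : List (String × Int) :=
  (s.toList.foldl
    (fun d i =>
      if i ≠ ' ' then
        if d.contains (String.mk [i]) then
          d.insert (String.mk [i]) (d.getD (String.mk [i]) 0 + 1)   -- ret_dict[i] += 1
        else
          d.insert (String.mk [i]) 1                                 -- ret_dict[i] = 1
      else d)
    PySem.Dict.empty).items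

-- ===== PORT B =====
-- Source B: {c: s.count(c) for c in dict.fromkeys(s) if c != " "} — dict.fromkeys is
-- PySem.List.dedup; the keys are distinct, so the comprehension's items are this map.
def dString_alt (s : String) : List (String × Int) :=
  ((PySem.List.dedup s.toList).filter (fun c => c ≠ ' ')).map
    (fun c => (String.mk [c], (PySem.Str.count s (String.mk [c]) : Int)))

-- ===== PRECONDITION & SPEC =====
def Spec_dString (s : String) (out : List (String × Int)) : Prop := out = dString_alt s
instance (s : String) (out : List (String × Int)) : Decidable (Spec_dString s out) := by unfold Spec_dString; infer_instance

-- ===== CLAIM (what is proved, stated in full; the proofs are below) =====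
def Claim_equal_dString : Prop := ∀ (s : String), Dom_dString s → Spec_dString s (dString s)

-- ===== LEMMAS AND PROOFS =====

theorem mkSingleton_injective : Function.Injective (fun c => String.mk [c]) := by
  intro a b h
  have h2 : (String.mk [a]).toList = (String.mk [b]).toList := congrArg String.toList h
  rw [show (String.mk [a]).toList = [a] from Eq.symm (String.ofList_eq.mp rfl),
      show (String.mk [b]).toList = [b] from Eq.symm (String.ofList_eq.mp rfl)] at h2
  exact List.singleton_injective h2

-- PySem.Chars.count.go with a single-character needle is List.count
theorem countGo_singleton (c : Char) (l : List Char) (fuel acc : Nat) (h : l.length ≤ fuel) :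
    PySem.Chars.count.go [c] fuel l acc = acc + l.count c := by
  induction l generalizing fuel acc with
  | nil => cases fuel <;> simp [PySem.Chars.count.go]
  | cons x t ih =>
    cases fuel with
    | zero => simp at h
    | succ n =>
      simp only [List.length_cons] at h
      by_cases hx : c = x
      · subst hx
        have hgo : PySem.Chars.count.go [c] (n + 1) (c :: t) acc
            = PySem.Chars.count.go [c] n t (acc + 1) := by
          simp [PySem.Chars.count.go, List.isPrefixOf]
        rw [hgo, ih n (acc + 1) (by omega)]
        simp
        omega
      · have hgo : PySem.Chars.count.go [c] (n + 1) (x :: t) acc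
            = PySem.Chars.count.go [c] n t acc := by
          simp [PySem.Chars.count.go, List.isPrefixOf, hx]
        rw [hgo, ih n acc (by omega)]
        simp [(Ne.symm hx : x ≠ c)]

theorem strCount_singleton (s : String) (c : Char) :
    PySem.Str.count s (String.mk [c]) = s.toList.count c := by
  have : (String.mk [c]).toList = [c] := Eq.symm (String.ofList_eq.mp rfl)
  simp only [PySem.Str.count, PySem.Chars.count, this]
  simp only [List.isEmpty_cons, Bool.false_eq_true, if_false]
  simpa using countGo_singleton c s.toList s.toList.length 0 le_rfl

-- Set.ofList commutes with filtering
theorem ofList_filter (p : Char → Bool) (l : List Char) :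
    PySem.Set.ofList (l.filter p) = (PySem.Set.ofList l).filter p := by
  induction l using List.reverseRecOn with
  | nil => rfl
  | append_singleton t a ih =>
    rw [List.filter_append, PySem.Set.ofList_append_singleton]
    by_cases hp : p a = true
    · simp only [List.filter_cons, hp, if_true, List.filter_nil]
      rw [PySem.Set.ofList_append_singleton]
      by_cases hm : a ∈ t
      · rw [PySem.Set.add_of_mem ((PySem.Set.mem_ofList _ _).2 (List.mem_filter.2 ⟨hm, hp⟩)),
            PySem.Set.add_of_mem ((PySem.Set.mem_ofList _ _).2 hm), ih]
      · rw [PySem.Set.add_of_not_mem (fun hc => hm (List.mem_of_mem_filter ((PySem.Set.mem_ofList _ _).1 hc))),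
            PySem.Set.add_of_not_mem (fun hc => hm ((PySem.Set.mem_ofList _ _).1 hc)),
            List.filter_append, ih]
        simp [hp]
    · simp only [List.filter_cons, hp]
      simp only [Bool.false_eq_true, if_false, List.filter_nil, List.append_nil]
      by_cases hm : a ∈ t
      · rw [PySem.Set.add_of_mem ((PySem.Set.mem_ofList _ _).2 hm), ih]
      · rw [PySem.Set.add_of_not_mem (fun hc => hm ((PySem.Set.mem_ofList _ _).1 hc)),
            List.filter_append, ih]
        simp [hp]

-- Set.ofList commutes with mapping an injective function
theorem ofList_map_injective (f : Char → String) (hf : Function.Injective f) (l : List Char) :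
    PySem.Set.ofList (l.map f) = (PySem.Set.ofList l).map f := by
  induction l using List.reverseRecOn with
  | nil => rfl
  | append_singleton t a ih =>
    rw [List.map_append, List.map_cons, List.map_nil,
        PySem.Set.ofList_append_singleton, PySem.Set.ofList_append_singleton]
    by_cases hm : a ∈ t
    · rw [PySem.Set.add_of_mem ((PySem.Set.mem_ofList _ _).2 (List.mem_map_of_mem hm)),
          PySem.Set.add_of_mem ((PySem.Set.mem_ofList _ _).2 hm), ih]
    · have hfm : f a ∉ PySem.Set.ofList (t.map f) := by
        intro hc
        obtain ⟨b, hb, hba⟩ := List.mem_map.1 ((PySem.Set.mem_ofList _ _).1 hc)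
        exact hm (hf hba ▸ hb)
      rw [PySem.Set.add_of_not_mem hfm,
          PySem.Set.add_of_not_mem (fun hc => hm ((PySem.Set.mem_ofList _ _).1 hc)),
          List.map_append, ih]
      rfl

-- A's loop step, with the two branches merged: both insert (getD + 1)
theorem step_merge (d : PySem.Dict String Int) (i : Char) :
    (if i ≠ ' ' then
        if d.contains (String.mk [i]) then
          d.insert (String.mk [i]) (d.getD (String.mk [i]) 0 + 1)
        else d.insert (String.mk [i]) 1
      else d)
    = (if i ≠ ' ' then d.insert (String.mk [i]) (d.getD (String.mk [i]) 0 + 1) else d) := by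
  by_cases hsp : i = ' '
  · simp [hsp]
  · simp only [hsp, ne_eq, not_false_iff, if_pos]
    by_cases hc : d.contains (String.mk [i]) = true
    · simp [hc]
    · simp only [Bool.not_eq_true] at hc
      rw [PySem.Dict.getD_of_not_contains d 0 hc]
      simp [hc]

-- ===== VERDICT (by name: the statement is the Claim_ definition above) =====
theorem dString_spec : Claim_equal_dString := by
  intro s _
  unfold Spec_dString dString dString_alt
  have hstep : s.toList.foldl
      (fun d i =>
        if i ≠ ' ' then
          if d.contains (String.mk [i]) then
            d.insert (String.mk [i]) (d.getD (String.mk [i]) 0 + 1)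
          else d.insert (String.mk [i]) 1
        else d)
      (PySem.Dict.empty : PySem.Dict String Int)
    = s.toList.foldl
      (fun d i => if i ≠ ' ' then d.insert (String.mk [i]) (d.getD (String.mk [i]) 0 + 1) else d)
      (PySem.Dict.empty : PySem.Dict String Int) := by
    apply PySem.List.foldl_congr_mem
    intro d i _
    exact step_merge d i
  rw [hstep]
  rw [PySem.List.foldl_ite_eq_foldl_filter]
  set F := s.toList.filter (fun i => decide (i ≠ ' ')) with hF
  have hmap : F.foldl
      (fun d i => d.insert (String.mk [i]) (d.getD (String.mk [i]) 0 + 1)) (PySem.Dict.empty : PySem.Dict String Int)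
    = (F.map (fun c => String.mk [c])).foldl
      (fun d k => d.insert k (d.getD k 0 + 1)) (PySem.Dict.empty : PySem.Dict String Int) := by
    rw [List.foldl_map]
  rw [hmap, PySem.Dict.foldl_insert_getD_add_one_eq_counter, PySem.Dict.items_counter]
  rw [ofList_map_injective _ mkSingleton_injective]
  rw [List.map_map]
  rw [show ((PySem.List.dedup s.toList).filter (fun c => c ≠ ' '))
        = PySem.Set.ofList F by
      rw [hF, ofList_filter]
      simp [PySem.List.dedup_eq_ofList]]
  apply List.map_congr_left
  intro c hc
  have hcF : c ∈ F := (PySem.Set.mem_ofList _ _).1 hc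
  have hcp : (decide (c ≠ ' ')) = true := by
    rw [hF] at hcF
    exact (List.mem_filter.1 hcF).2
  simp only [Function.comp_apply]
  rw [List.count_map_of_injective _ _ mkSingleton_injective, strCount_singleton]
  have hcount : List.count c F = List.count c s.toList := by
    rw [hF]
    exact List.count_filter hcp
  rw [hcount]
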